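-- pv_equiv track=rewrite | github.com/kmariasksks/algo | count_pairs.py | count_possible_pairs
-- ===== SOURCE A (Python) =====
-- def count_possible_pairs(tribes):
--     count = 0
--     pairs = []
--     for i in range(len(tribes)):
--         for j in range(i + 1, len(tribes)):
--             for male in tribes[i]:
--                 for female in tribes[j]:
--                     if male % 2 != female % 2:
--                         count += 1
--                         pairs.append(f"{male}/{female}")
--     return count, pairs
-- ===== SOURCE B (Python) =====
-- def count_possible_pairs(tribes):
--     n = len(tribes)
--     evens = [[x for x in t if x % 2 == 0] for t in tribes]
--     odds = [[x for x in t if x % 2 != 0] for t in tribes]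
--     count = sum(len(evens[i]) * len(odds[j]) + len(odds[i]) * len(evens[j])
--                 for i in range(n) for j in range(i + 1, n))
--     pairs = [f"{m}/{f}"
--              for i in range(n) for j in range(i + 1, n)
--              for m in tribes[i]
--              for f in (evens[j] if m % 2 else odds[j])]
--     return count, pairs
-- ===== Notes on version B (the rewrite author's own statement) =====
-- stated objective: alternative
-- what changed: B partitions each tribe once into even/odd sublists, computes the count by closed-form arithmetic len(evens_i)*len(odds_j)+len(odds_i)*len(evens_j) over i<j instead of counting inside a quadruple loop, and builds the pairs list by mapping each male over the precomputed opposite-parity sublist instead of testing every (male,female) pair.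
import Mathlib
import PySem

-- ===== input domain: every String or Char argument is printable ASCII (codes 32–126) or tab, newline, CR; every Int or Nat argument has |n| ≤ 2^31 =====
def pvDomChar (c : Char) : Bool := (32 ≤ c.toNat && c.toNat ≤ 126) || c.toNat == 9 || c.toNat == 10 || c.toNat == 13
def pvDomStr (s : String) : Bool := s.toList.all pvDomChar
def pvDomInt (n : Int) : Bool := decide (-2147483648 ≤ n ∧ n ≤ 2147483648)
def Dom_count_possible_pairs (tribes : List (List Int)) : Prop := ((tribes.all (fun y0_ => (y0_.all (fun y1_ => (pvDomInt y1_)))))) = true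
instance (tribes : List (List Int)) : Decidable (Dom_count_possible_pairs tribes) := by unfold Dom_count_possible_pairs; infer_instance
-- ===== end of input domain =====

-- B replaces A's quadruple loop by per-tribe even/odd partitions: the count becomes closed-form
-- arithmetic over the partition sizes and each male is paired with a whole precomputed sublist
-- (objective: alternative decomposition; same emission order, return value only).

-- ===== PORT A =====
def count_possible_pairs (tribes : List (List Int)) : Int × List String :=
  (PySem.List.pyRange 0 (tribes.length : Int) 1).foldl (fun st i =>
    (PySem.List.pyRange (i + 1) (tribes.length : Int) 1).foldl (fun st j =>
      (PySem.List.pyGetD tribes i []).foldl (fun st male =>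
        (PySem.List.pyGetD tribes j []).foldl (fun st female =>
          if PySem.Int.mod male 2 ≠ PySem.Int.mod female 2 then
            (st.1 + 1, st.2 ++ [PySem.Int.toStr male ++ "/" ++ PySem.Int.toStr female])
          else st) st) st) st) ((0 : Int), ([] : List String))

-- ===== PORT B =====
def count_possible_pairs_alt (tribes : List (List Int)) : Int × List String :=
  let n : Int := (tribes.length : Int)
  let evens := tribes.map (fun t => t.filter (fun x => decide (PySem.Int.mod x 2 = 0)))
  let odds := tribes.map (fun t => t.filter (fun x => decide (PySem.Int.mod x 2 ≠ 0)))
  let count : Int :=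
    ((PySem.List.pyRange 0 n 1).flatMap (fun i =>
      (PySem.List.pyRange (i + 1) n 1).map (fun j =>
        ((PySem.List.pyGetD evens i []).length * (PySem.List.pyGetD odds j []).length
          + (PySem.List.pyGetD odds i []).length * (PySem.List.pyGetD evens j []).length : Int)))).sum
  let pairs : List String :=
    (PySem.List.pyRange 0 n 1).flatMap (fun i =>
      (PySem.List.pyRange (i + 1) n 1).flatMap (fun j =>
        (PySem.List.pyGetD tribes i []).flatMap (fun m =>
          (if PySem.Int.mod m 2 ≠ 0 then PySem.List.pyGetD evens j [] else PySem.List.pyGetD odds j []).map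
            (fun f => PySem.Int.toStr m ++ "/" ++ PySem.Int.toStr f))))
  (count, pairs)

-- ===== PRECONDITION & SPEC =====
def Spec_count_possible_pairs (tribes : List (List Int)) (out : Int × List String) : Prop := out = count_possible_pairs_alt tribes
instance (tribes : List (List Int)) (out : Int × List String) : Decidable (Spec_count_possible_pairs tribes out) := by unfold Spec_count_possible_pairs; infer_instance

-- ===== CLAIM (what is proved, stated in full; the proofs are below) =====
def Claim_equal_count_possible_pairs : Prop := ∀ (tribes : List (List Int)), Dom_count_possible_pairs tribes → Spec_count_possible_pairs tribes (count_possible_pairs tribes)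

-- ===== LEMMAS AND PROOFS =====

-- a loop that adds h1 x to one accumulator and appends h2 x to the other, split into sum + flatMap
theorem pvSplitLoop {β : Type} (l : List β) (h1 : β → Int) (h2 : β → List String)
    (st : Int × List String) :
    l.foldl (fun st x => (st.1 + h1 x, st.2 ++ h2 x)) st
      = (st.1 + (l.map h1).sum, st.2 ++ l.flatMap h2) := by
  obtain ⟨c, p⟩ := st
  rw [PySem.List.foldl_prod_mk (f := fun a x => a + h1 x) (g := fun a x => a ++ h2 x),
    PySem.List.foldl_add, PySem.List.foldl_append_eq_flatMap]

-- the innermost female loop of A: one count increment + one append per opposite-parity female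
theorem pvFemaleLoop (tj : List Int) (m : Int) (st : Int × List String) :
    tj.foldl (fun st female =>
        if PySem.Int.mod m 2 ≠ PySem.Int.mod female 2 then
          (st.1 + 1, st.2 ++ [PySem.Int.toStr m ++ "/" ++ PySem.Int.toStr female])
        else st) st
      = (st.1 + (tj.countP (fun f => decide (PySem.Int.mod m 2 ≠ PySem.Int.mod f 2)) : Int),
         st.2 ++ (tj.filter (fun f => decide (PySem.Int.mod m 2 ≠ PySem.Int.mod f 2))).map
           (fun f => PySem.Int.toStr m ++ "/" ++ PySem.Int.toStr f)) := by
  rw [PySem.List.foldl_congr_mem tj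
    (fun st female =>
      if PySem.Int.mod m 2 ≠ PySem.Int.mod female 2 then
        (st.1 + 1, st.2 ++ [PySem.Int.toStr m ++ "/" ++ PySem.Int.toStr female])
      else st)
    (fun st f =>
      ((if PySem.Int.mod m 2 ≠ PySem.Int.mod f 2 then st.1 + 1 else st.1),
       (if PySem.Int.mod m 2 ≠ PySem.Int.mod f 2 then
          st.2 ++ [PySem.Int.toStr m ++ "/" ++ PySem.Int.toStr f] else st.2)))
    st (by intro acc x _; dsimp only; split_ifs <;> rfl)]
  obtain ⟨c, p⟩ := st
  rw [PySem.List.foldl_prod_mk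
      (f := fun a f => if PySem.Int.mod m 2 ≠ PySem.Int.mod f 2 then a + 1 else a)
      (g := fun a f => if PySem.Int.mod m 2 ≠ PySem.Int.mod f 2 then
          a ++ [PySem.Int.toStr m ++ "/" ++ PySem.Int.toStr f] else a),
    PySem.List.foldl_ite_add_one, PySem.List.foldl_append_ite]

-- the male loop of A over one tribe pair, in sum + flatMap form
theorem pvMaleLoop (ti tj : List Int) (st : Int × List String) :
    ti.foldl (fun st male =>
        tj.foldl (fun st female =>
          if PySem.Int.mod male 2 ≠ PySem.Int.mod female 2 then
            (st.1 + 1, st.2 ++ [PySem.Int.toStr male ++ "/" ++ PySem.Int.toStr female])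
          else st) st) st
      = (st.1 + (ti.map (fun m =>
            (tj.countP (fun f => decide (PySem.Int.mod m 2 ≠ PySem.Int.mod f 2)) : Int))).sum,
         st.2 ++ ti.flatMap (fun m =>
            (tj.filter (fun f => decide (PySem.Int.mod m 2 ≠ PySem.Int.mod f 2))).map
              (fun f => PySem.Int.toStr m ++ "/" ++ PySem.Int.toStr f))) := by
  rw [PySem.List.foldl_congr_mem ti _
    (fun st m =>
      (st.1 + (tj.countP (fun f => decide (PySem.Int.mod m 2 ≠ PySem.Int.mod f 2)) : Int),
       st.2 ++ (tj.filter (fun f => decide (PySem.Int.mod m 2 ≠ PySem.Int.mod f 2))).map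
         (fun f => PySem.Int.toStr m ++ "/" ++ PySem.Int.toStr f)))
    st (by intro acc m _; exact pvFemaleLoop tj m acc)]
  exact pvSplitLoop ti _ _ st

-- per male m, the opposite-parity filter is the precomputed even/odd sublist
theorem pvFilterOpp (tj : List Int) (m : Int) :
    tj.filter (fun f => decide (PySem.Int.mod m 2 ≠ PySem.Int.mod f 2))
      = if PySem.Int.mod m 2 ≠ 0 then tj.filter (fun x => decide (PySem.Int.mod x 2 = 0))
        else tj.filter (fun x => decide (PySem.Int.mod x 2 ≠ 0)) := by
  rcases PySem.Int.mod_two_eq m with hm | hm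
  · rw [if_neg (by rw [hm]; decide)]
    refine List.filter_congr ?_
    intro f _
    rcases PySem.Int.mod_two_eq f with hf | hf <;> (simp only [hm, hf]; try decide)
  · rw [if_pos (by rw [hm]; decide)]
    refine List.filter_congr ?_
    intro f _
    rcases PySem.Int.mod_two_eq f with hf | hf <;> (simp only [hm, hf]; try decide)

-- the per-male pair block of A is the per-male pair block of B
theorem pvPairInner (tj : List Int) (m : Int) :
    (tj.filter (fun f => decide (PySem.Int.mod m 2 ≠ PySem.Int.mod f 2))).map
        (fun f => PySem.Int.toStr m ++ "/" ++ PySem.Int.toStr f)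
      = (if PySem.Int.mod m 2 ≠ 0 then tj.filter (fun x => decide (PySem.Int.mod x 2 = 0))
         else tj.filter (fun x => decide (PySem.Int.mod x 2 ≠ 0))).map
        (fun f => PySem.Int.toStr m ++ "/" ++ PySem.Int.toStr f) := by
  rw [pvFilterOpp]

-- per tribe pair, the number of opposite-parity couples in closed form
theorem pvCountClosed (ti tj : List Int) :
    (ti.map (fun m =>
        (tj.countP (fun f => decide (PySem.Int.mod m 2 ≠ PySem.Int.mod f 2)) : Int))).sum
      = ((ti.filter (fun x => decide (PySem.Int.mod x 2 = 0))).length : Int)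
          * ((tj.filter (fun x => decide (PySem.Int.mod x 2 ≠ 0))).length : Int)
        + ((ti.filter (fun x => decide (PySem.Int.mod x 2 ≠ 0))).length : Int)
          * ((tj.filter (fun x => decide (PySem.Int.mod x 2 = 0))).length : Int) := by
  induction ti with
  | nil => simp
  | cons m ti ih =>
    rw [List.map_cons, List.sum_cons, ih, List.countP_eq_length_filter, pvFilterOpp]
    rcases PySem.Int.mod_two_eq m with hm | hm
    · rw [if_neg (by rw [hm]; decide),
        List.filter_cons_of_pos (by rw [hm]; decide),
        List.filter_cons_of_neg (by rw [hm]; decide),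
        List.length_cons]
      push_cast
      ring
    · rw [if_pos (by rw [hm]; decide),
        List.filter_cons_of_neg (by rw [hm]; decide),
        List.filter_cons_of_pos (by rw [hm]; decide),
        List.length_cons]
      push_cast
      ring

-- a tribe looked up in the precomputed partition list is the filtered tribe
theorem pvGetDFilter (tribes : List (List Int)) (i : Int) (p : Int → Bool) :
    PySem.List.pyGetD (tribes.map (fun t => t.filter p)) i []
      = (PySem.List.pyGetD tribes i []).filter p := by
  simpa using PySem.List.pyGetD_map (fun t => t.filter p) tribes i []

-- the closed form per tribe pair, phrased on the looked-up partition lists of B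
theorem pvCountGetD (tribes : List (List Int)) (i j : Int) :
    ((PySem.List.pyGetD tribes i []).map (fun m =>
        ((PySem.List.pyGetD tribes j []).countP
          (fun f => decide (PySem.Int.mod m 2 ≠ PySem.Int.mod f 2)) : Int))).sum
      = ((PySem.List.pyGetD (tribes.map (fun t =>
              t.filter (fun x => decide (PySem.Int.mod x 2 = 0)))) i []).length : Int)
          * ((PySem.List.pyGetD (tribes.map (fun t =>
              t.filter (fun x => decide (PySem.Int.mod x 2 ≠ 0)))) j []).length : Int)
        + ((PySem.List.pyGetD (tribes.map (fun t =>
              t.filter (fun x => decide (PySem.Int.mod x 2 ≠ 0)))) i []).length : Int)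
          * ((PySem.List.pyGetD (tribes.map (fun t =>
              t.filter (fun x => decide (PySem.Int.mod x 2 = 0)))) j []).length : Int) := by
  rw [pvGetDFilter, pvGetDFilter, pvGetDFilter, pvGetDFilter, pvCountClosed]

-- ===== VERDICT (by name: the statement is the Claim_ definition above) =====
theorem count_possible_pairs_spec : Claim_equal_count_possible_pairs := by
  intro tribes _
  unfold Spec_count_possible_pairs count_possible_pairs count_possible_pairs_alt
  dsimp only
  rw [PySem.List.foldl_congr_mem (PySem.List.pyRange 0 (tribes.length : Int) 1) _
    (fun st i =>
      (st.1 + ((PySem.List.pyRange (i + 1) (tribes.length : Int) 1).map (fun j =>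
          ((PySem.List.pyGetD tribes i []).map (fun m =>
            ((PySem.List.pyGetD tribes j []).countP
              (fun f => decide (PySem.Int.mod m 2 ≠ PySem.Int.mod f 2)) : Int))).sum)).sum,
       st.2 ++ (PySem.List.pyRange (i + 1) (tribes.length : Int) 1).flatMap (fun j =>
          (PySem.List.pyGetD tribes i []).flatMap (fun m =>
            ((PySem.List.pyGetD tribes j []).filter
              (fun f => decide (PySem.Int.mod m 2 ≠ PySem.Int.mod f 2))).map
              (fun f => PySem.Int.toStr m ++ "/" ++ PySem.Int.toStr f)))))
    ((0 : Int), ([] : List String))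
    (by
      intro acc i _
      rw [PySem.List.foldl_congr_mem (PySem.List.pyRange (i + 1) (tribes.length : Int) 1) _
        (fun st j =>
          (st.1 + ((PySem.List.pyGetD tribes i []).map (fun m =>
            ((PySem.List.pyGetD tribes j []).countP
              (fun f => decide (PySem.Int.mod m 2 ≠ PySem.Int.mod f 2)) : Int))).sum,
           st.2 ++ (PySem.List.pyGetD tribes i []).flatMap (fun m =>
            ((PySem.List.pyGetD tribes j []).filter
              (fun f => decide (PySem.Int.mod m 2 ≠ PySem.Int.mod f 2))).map
              (fun f => PySem.Int.toStr m ++ "/" ++ PySem.Int.toStr f))))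
        acc
        (by intro acc2 j _; exact pvMaleLoop (PySem.List.pyGetD tribes i []) (PySem.List.pyGetD tribes j []) acc2)]
      exact pvSplitLoop _ _ _ acc),
    pvSplitLoop]
  refine Prod.ext ?_ ?_
  · show (0 : Int) + _ = _
    rw [List.flatMap_def, List.sum_flatten]
    simp only [zero_add, List.map_map, Function.comp_def, pvCountGetD]
  · show ([] : List String) ++ _ = _
    simp only [List.nil_append, pvGetDFilter, pvPairInner]
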